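-- pv_equiv track=rewrite | github.com/nash911/hunknote | hunknote/git_ctx.py | _parse_file_changes
-- ===== SOURCE A (Python) =====
-- def _parse_file_changes(status: str) -> str:
--     """Parse git status into a human-readable file change summary.
--
--     This helps the LLM understand which files are NEW (didn't exist before)
--     versus MODIFIED (already existed and are being changed).
--
--     Args:
--         status: Git status in porcelain format.
--
--     Returns:
--         Human-readable summary of file changes.
--     """
--     new_files = []
--     modified_files = []
--     deleted_files = []
--     renamed_files = []
--
--     for line in status.split("\n"):
--         if not line or line.startswith("##"):
--             continue
--         if len(line) < 3:
--             continue
--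
--         status_code = line[0]
--         filename = line[3:]
--
--         # Handle renames: "R  old -> new"
--         if " -> " in filename:
--             old_name, new_name = filename.split(" -> ")
--             renamed_files.append(f"{old_name} -> {new_name}")
--             continue
--
--         if status_code == "A":
--             new_files.append(filename)
--         elif status_code == "M":
--             modified_files.append(filename)
--         elif status_code == "D":
--             deleted_files.append(filename)
--
--     # Build summary
--     lines = []
--     if new_files:
--         lines.append("New files (did not exist before this commit):")
--         for f in new_files:
--             lines.append(f"  + {f}")
--     if modified_files:
--         lines.append("Modified files (already existed, now changed):")
--         for f in modified_files:
--             lines.append(f"  ~ {f}")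
--     if deleted_files:
--         lines.append("Deleted files:")
--         for f in deleted_files:
--             lines.append(f"  - {f}")
--     if renamed_files:
--         lines.append("Renamed files:")
--         for f in renamed_files:
--             lines.append(f"  > {f}")
--
--     return "\n".join(lines) if lines else "(no files)"
-- ===== SOURCE B (Python) =====
-- _SECTIONS = [
--     ("New files (did not exist before this commit):", "  + ", "A"),
--     ("Modified files (already existed, now changed):", "  ~ ", "M"),
--     ("Deleted files:", "  - ", "D"),
--     ("Renamed files:", "  > ", None),
-- ]
--
--
-- def _parse_file_changes(status: str) -> str:
--     entries = [l for l in status.split("\n") if len(l) >= 3 and not l.startswith("##")]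
--     out = []
--     for header, prefix, code in _SECTIONS:
--         if code is None:
--             files = [l[3:] for l in entries if " -> " in l[3:]]
--         else:
--             files = [l[3:] for l in entries if l[0] == code and " -> " not in l[3:]]
--         if files:
--             out.append(header)
--             out.extend(prefix + f for f in files)
--     return "\n".join(out) if out else "(no files)"
-- ===== Notes on version B (the rewrite author's own statement) =====
-- stated objective: alternative
-- what changed: Instead of one classification pass that routes each line into four accumulator lists and four copy-pasted formatting blocks, B prefilters the entry lines once and then builds each output section independently by its own filtered scan (a per-section filter+slice comprehension driven by an ordered section table); rename entries are kept whole rather than split and rejoined.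
import Mathlib
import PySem

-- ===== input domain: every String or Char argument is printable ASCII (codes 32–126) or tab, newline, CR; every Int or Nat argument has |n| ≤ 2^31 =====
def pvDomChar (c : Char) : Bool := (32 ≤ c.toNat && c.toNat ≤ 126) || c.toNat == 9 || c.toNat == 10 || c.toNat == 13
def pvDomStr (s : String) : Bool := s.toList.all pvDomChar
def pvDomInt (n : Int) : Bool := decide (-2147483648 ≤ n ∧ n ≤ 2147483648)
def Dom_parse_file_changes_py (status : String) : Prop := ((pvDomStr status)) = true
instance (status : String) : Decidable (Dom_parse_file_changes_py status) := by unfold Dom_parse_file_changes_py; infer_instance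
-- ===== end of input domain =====

-- B drops A's single classification pass into four buckets: it prefilters the entry lines once and
-- then builds each output section by its own filtered scan of those entries (staged passes).

-- ===== PORT A =====
def pvHdrNew : List Char := "New files (did not exist before this commit):".toList
def pvHdrMod : List Char := "Modified files (already existed, now changed):".toList
def pvHdrDel : List Char := "Deleted files:".toList
def pvHdrRen : List Char := "Renamed files:".toList
def pvArrow : List Char := " -> ".toList
def pvHash : List Char := "##".toList
def pvPrefNew : List Char := "  + ".toList
def pvPrefMod : List Char := "  ~ ".toList
def pvPrefDel : List Char := "  - ".toList
def pvPrefRen : List Char := "  > ".toList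

def pvQuad := List (List Char) × List (List Char) × List (List Char) × List (List Char)

-- one iteration of A's classification loop (state: new, modified, deleted, renamed)
def pvAStep (st : pvQuad) (line : List Char) : pvQuad :=
  if line.isEmpty || PySem.Chars.startswith line pvHash then st
  else if PySem.Chars.len line < 3 then st
  else
    let status_code := PySem.Chars.pyGet? line 0
    let filename := PySem.Chars.slice line (some 3) none
    if PySem.Chars.isIn pvArrow filename then
      -- old_name, new_name = filename.split(" -> "): Python raises ValueError unless exactly
      -- two parts; those inputs are excluded by Pre_ (fallback branch is unreachable there)
      match PySem.Chars.splitOn filename pvArrow with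
      | [old_name, new_name] => (st.1, st.2.1, st.2.2.1, st.2.2.2 ++ [old_name ++ pvArrow ++ new_name])
      | _ => st
    else
      if status_code = some 'A' then (st.1 ++ [filename], st.2.1, st.2.2.1, st.2.2.2)
      else if status_code = some 'M' then (st.1, st.2.1 ++ [filename], st.2.2.1, st.2.2.2)
      else if status_code = some 'D' then (st.1, st.2.1, st.2.2.1 ++ [filename], st.2.2.2)
      else st

def parse_file_changes_py (status : String) : String :=
  let st := (PySem.Chars.splitOn status.toList "\n".toList).foldl pvAStep (([], [], [], []) : pvQuad)
  let new_files := st.1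
  let modified_files := st.2.1
  let deleted_files := st.2.2.1
  let renamed_files := st.2.2.2
  let lines : List (List Char) := []
  let lines := if new_files.isEmpty then lines else
    new_files.foldl (fun acc f => acc ++ [pvPrefNew ++ f]) (lines ++ [pvHdrNew])
  let lines := if modified_files.isEmpty then lines else
    modified_files.foldl (fun acc f => acc ++ [pvPrefMod ++ f]) (lines ++ [pvHdrMod])
  let lines := if deleted_files.isEmpty then lines else
    deleted_files.foldl (fun acc f => acc ++ [pvPrefDel ++ f]) (lines ++ [pvHdrDel])
  let lines := if renamed_files.isEmpty then lines else
    renamed_files.foldl (fun acc f => acc ++ [pvPrefRen ++ f]) (lines ++ [pvHdrRen])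
  if lines.isEmpty then "(no files)" else String.ofList (PySem.Chars.join "\n".toList lines)

-- ===== PORT B =====
-- B: entries = [l for l in split if len(l) >= 3 and not l.startswith("##")]
def pvKeepB (l : List Char) : Bool :=
  decide (3 ≤ PySem.Chars.len l) && !PySem.Chars.startswith l pvHash

-- the per-section filtered scan: [l[3:] for l in entries if <section's predicate>]
def pvSelect (entries : List (List Char)) (code : Option Char) : List (List Char) :=
  match code with
  | none =>
      (entries.filter (fun l =>
        PySem.Chars.isIn pvArrow (PySem.Chars.slice l (some 3) none))).map
        (fun l => PySem.Chars.slice l (some 3) none)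
  | some c =>
      (entries.filter (fun l =>
        (PySem.Chars.pyGet? l 0 == some c) &&
        !PySem.Chars.isIn pvArrow (PySem.Chars.slice l (some 3) none))).map
        (fun l => PySem.Chars.slice l (some 3) none)

def pvSections : List (List Char × List Char × Option Char) :=
  [(pvHdrNew, pvPrefNew, some 'A'), (pvHdrMod, pvPrefMod, some 'M'),
   (pvHdrDel, pvPrefDel, some 'D'), (pvHdrRen, pvPrefRen, none)]

def parse_file_changes_py_alt (status : String) : String :=
  let entries := (PySem.Chars.splitOn status.toList "\n".toList).filter pvKeepB
  let out := pvSections.foldl (fun acc s =>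
      let files := pvSelect entries s.2.2
      if files.isEmpty then acc else acc ++ [s.1] ++ files.map (fun f => s.2.1 ++ f)) []
  if out.isEmpty then "(no files)" else String.ofList (PySem.Chars.join "\n".toList out)

-- ===== PRECONDITION & SPEC =====
-- Pre_ excludes statuses where some processed line's filename contains the rename arrow
-- separator more than once: there A's two-variable unpack of the rename split raises ValueError.
def Pre_parse_file_changes_py (status : String) : Prop :=
  ∀ line ∈ PySem.Chars.splitOn status.toList "\n".toList,
    PySem.Chars.startswith line pvHash = false →
    3 ≤ line.length →
    PySem.Chars.isIn pvArrow (line.drop 3) = true →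
    (PySem.Chars.splitOn (line.drop 3) pvArrow).length = 2
instance (status : String) : Decidable (Pre_parse_file_changes_py status) := by
  unfold Pre_parse_file_changes_py; infer_instance

def pvWitness_parse_file_changes_py : String := "## main\nA  new.py\nM  mod.py\nD  del.py\nR  old.py -> new.py"

def Spec_parse_file_changes_py (status : String) (out : String) : Prop :=
  out = parse_file_changes_py_alt status
instance (status : String) (out : String) : Decidable (Spec_parse_file_changes_py status out) := by
  unfold Spec_parse_file_changes_py; infer_instance

-- ===== CLAIM (what is proved, stated in full; the proofs are below) =====
def Claim_equal_parse_file_changes_py : Prop := ∀ (status : String), Dom_parse_file_changes_py status → Pre_parse_file_changes_py status → Spec_parse_file_changes_py status (parse_file_changes_py status)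

-- ===== LEMMAS AND PROOFS =====

theorem pv_join_cons (sep a : List Char) (ls : List (List Char)) (h : ls ≠ []) :
    PySem.Chars.join sep (a :: ls) = a ++ sep ++ PySem.Chars.join sep ls := by
  cases ls with
  | nil => exact absurd rfl h
  | cons b t => exact PySem.Chars.join_cons_cons sep a b t

theorem pv_join_last2 (sep : List Char) (ys : List (List Char)) (u v : List Char) :
    PySem.Chars.join sep (ys ++ [u, v]) = PySem.Chars.join sep (ys ++ [u ++ sep ++ v]) := by
  induction ys with
  | nil => simp [PySem.Chars.join_cons_cons, PySem.Chars.join_singleton]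
  | cons a t ih =>
    rw [List.cons_append, List.cons_append,
      pv_join_cons sep a (t ++ [u, v]) (by simp),
      pv_join_cons sep a (t ++ [u ++ sep ++ v]) (by simp), ih]

theorem pv_go_join (sep : List Char) (hsep : sep ≠ []) :
    ∀ (fuel : Nat) (l cur : List Char) (acc : List (List Char)), l.length < fuel →
    PySem.Chars.join sep (PySem.Chars.splitOn.go sep fuel l cur acc) =
    PySem.Chars.join sep (acc.reverse ++ [cur.reverse ++ l]) := by
  intro fuel
  induction fuel with
  | zero => intro l cur acc h; omega
  | succ f ih =>
    intro l cur acc h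
    cases l with
    | nil => simp [PySem.Chars.splitOn.go]
    | cons c rest =>
      rw [PySem.Chars.splitOn.go]
      by_cases hp : sep.isPrefixOf (c :: rest) = true
      · rw [if_pos hp]
        rw [ih _ _ _ (by
          have hle := (List.isPrefixOf_iff_prefix.mp hp).length_le
          have hs : 0 < sep.length := List.length_pos_iff.mpr hsep
          simp only [List.length_drop]
          simp at h ⊢; omega)]
        obtain ⟨t, ht⟩ := List.isPrefixOf_iff_prefix.mp hp
        have hdrop : List.drop sep.length (c :: rest) = t := by rw [← ht]; simp
        rw [hdrop]
        have hrw : acc.reverse ++ [cur.reverse ++ (c :: rest)]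
            = acc.reverse ++ [cur.reverse ++ sep ++ t] := by rw [← ht]; simp
        rw [hrw]
        calc PySem.Chars.join sep ((cur.reverse :: acc).reverse ++ [[] ++ t])
            = PySem.Chars.join sep (acc.reverse ++ [cur.reverse, t]) := by simp
          _ = PySem.Chars.join sep (acc.reverse ++ [cur.reverse ++ sep ++ t]) := pv_join_last2 ..
      · rw [if_neg hp]
        rw [ih _ _ _ (by simp at h ⊢; omega)]
        simp

theorem pv_join_splitOn (s sep : List Char) (hsep : sep ≠ []) :
    PySem.Chars.join sep (PySem.Chars.splitOn s sep) = s := by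
  rw [PySem.Chars.splitOn, pv_go_join sep hsep _ _ _ _ (by omega)]
  simp [PySem.Chars.join_singleton]

theorem pv_splitOn_pair (s sep a b : List Char) (hsep : sep ≠ [])
    (h : PySem.Chars.splitOn s sep = [a, b]) : a ++ sep ++ b = s := by
  have hj := pv_join_splitOn s sep hsep
  rw [h, PySem.Chars.join_cons_cons, PySem.Chars.join_singleton] at hj
  exact hj

-- the four per-category selections, over the raw split lines
def pvSel (code : Option Char) (lines : List (List Char)) : List (List Char) :=
  pvSelect (lines.filter pvKeepB) code

theorem pvSel_nil (code : Option Char) : pvSel code [] = [] := by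
  cases code <;> rfl

theorem pvSel_cons (code : Option Char) (l : List Char) (rest : List (List Char)) :
    pvSel code (l :: rest) = pvSel code [l] ++ pvSel code rest := by
  have h : ∀ (p : List Char → Bool) (f : List Char → List Char),
      (((l :: rest).filter pvKeepB).filter p).map f
        = (([l].filter pvKeepB).filter p).map f ++ ((rest.filter pvKeepB).filter p).map f := by
    intro p f
    by_cases hq : pvKeepB l <;> by_cases hp : p l <;>
      simp [List.filter_cons, hq, hp]
  cases code with
  | none => exact h _ _
  | some c => exact h _ _

-- one line of A's loop, expressed through B's per-category selections
theorem pv_step_sel (line : List Char)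
    (hline : PySem.Chars.startswith line pvHash = false → 3 ≤ line.length →
      PySem.Chars.isIn pvArrow (line.drop 3) = true →
      (PySem.Chars.splitOn (line.drop 3) pvArrow).length = 2)
    (n m d r : List (List Char)) :
    pvAStep (n, m, d, r) line =
      (n ++ pvSel (some 'A') [line], m ++ pvSel (some 'M') [line],
       d ++ pvSel (some 'D') [line], r ++ pvSel none [line]) := by
  by_cases hss : PySem.Chars.startswith line pvHash = true
  · have hk : pvKeepB line = false := by simp [pvKeepB, hss]
    by_cases hemp : line.isEmpty <;>
      simp [pvAStep, pvSel, pvSelect, hss, hemp, List.filter_cons, hk, PySem.Chars.len_eq]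
  · have hss' : PySem.Chars.startswith line pvHash = false := by simpa using hss
    by_cases h3 : (line.length : Int) < 3
    · have hk : pvKeepB line = false := by
        simp [pvKeepB, PySem.Chars.len_eq]; omega
      by_cases hemp : line.isEmpty <;>
        simp [pvAStep, pvSel, pvSelect, hss', hemp, List.filter_cons, hk, PySem.Chars.len_eq, h3]
    · have h3n : 3 ≤ line.length := by omega
      have hk : pvKeepB line = true := by
        simp [pvKeepB, PySem.Chars.len_eq, hss']; omega
      have hemp : line.isEmpty = false := by
        cases line with
        | nil => norm_num at h3
        | cons c t => simp
      have hfn : PySem.Chars.slice line (some 3) none = line.drop 3 := by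
        rw [PySem.Chars.slice_eq_listSlice,
          show (3 : Int) = ((3 : Nat) : Int) from rfl, PySem.List.slice_from_natCast]
      have hfn' : PySem.List.slice line (some 3) none = line.drop 3 := by
        rw [← PySem.Chars.slice_eq_listSlice]; exact hfn
      by_cases hin : PySem.Chars.isIn pvArrow (line.drop 3) = true
      · have hlen2 := hline hss' h3n hin
        obtain ⟨a, b, hab⟩ := List.length_eq_two.mp hlen2
        have hfil : a ++ pvArrow ++ b = line.drop 3 :=
          pv_splitOn_pair _ _ _ _ (by decide) hab
        simp only [pvAStep, hss', hemp, PySem.Chars.len_eq, h3, hfn, hin, hab,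
          Bool.or_false, if_false, Bool.false_eq_true]
        simp [pvSel, pvSelect, List.filter_cons, hk, hfn', hin, hfil]
      · have hin' : PySem.Chars.isIn pvArrow (line.drop 3) = false := by simpa using hin
        cases line with
        | nil => norm_num at h3
        | cons c t =>
          have hget : PySem.Chars.pyGet? (c :: t) 0 = some c := by
            simp [PySem.Chars.pyGet?_eq_listPyGet?, PySem.List.pyGet?, PySem.List.pyIdx?]
          have hget' : PySem.List.pyGet? (c :: t) 0 = some c := by
            simp [PySem.List.pyGet?, PySem.List.pyIdx?]
          have hin2 : PySem.Chars.isIn pvArrow (List.drop 2 t) = false := by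
            simpa using hin' 
          simp only [pvAStep, hss', hemp, PySem.Chars.len_eq, h3, hfn, hin',
            Bool.or_false, if_false, Bool.false_eq_true, hget]
          by_cases hA : c = 'A'
          · subst hA; simp [pvSel, pvSelect, List.filter_cons, hk, hfn', hin', hin2, hget']
          · by_cases hM : c = 'M'
            · subst hM; simp [pvSel, pvSelect, List.filter_cons, hk, hfn', hin', hin2, hget', hA]
            · by_cases hD : c = 'D'
              · subst hD; simp [pvSel, pvSelect, List.filter_cons, hk, hfn', hin', hin2, hget', hA, hM]
              · simp [pvSel, pvSelect, List.filter_cons, hk, hfn', hin', hin2, hget', hA, hM, hD]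

theorem pv_fold_sel (lines : List (List Char))
    (hpre : ∀ line ∈ lines,
      PySem.Chars.startswith line pvHash = false → 3 ≤ line.length →
      PySem.Chars.isIn pvArrow (line.drop 3) = true →
      (PySem.Chars.splitOn (line.drop 3) pvArrow).length = 2) :
    ∀ (n m d r : List (List Char)),
    lines.foldl pvAStep (n, m, d, r) =
      (n ++ pvSel (some 'A') lines, m ++ pvSel (some 'M') lines,
       d ++ pvSel (some 'D') lines, r ++ pvSel none lines) := by
  induction lines with
  | nil => intro n m d r; simp [pvSel_nil]
  | cons line rest ih =>
    intro n m d r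
    simp only [List.foldl_cons, pv_step_sel line (hpre line (by simp)) n m d r,
      ih (fun l hl => hpre l (by simp [hl])),
      pvSel_cons _ line rest, List.append_assoc]

-- one formatting stage of A, as the section it contributes
theorem pv_stage (ls : List (List Char)) (xs : List (List Char)) (hdr pref : List Char) :
    (if xs.isEmpty then ls else xs.foldl (fun acc f => acc ++ [pref ++ f]) (ls ++ [hdr]))
    = ls ++ (if xs.isEmpty then [] else [hdr] ++ xs.map (fun f => pref ++ f)) := by
  split_ifs with h
  · simp
  · rw [PySem.List.foldl_append_singleton_eq_map]; simp

theorem pv_flatten_sing (f : List Char → List Char) (l : List (List Char)) :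
    (l.map (fun x => [f x])).flatten = l.map f := by
  induction l with
  | nil => rfl
  | cons a t ih => simp [ih]

-- one step of B's section-building fold, in accumulator-appended form
theorem pv_stageB (acc : List (List Char)) (files : List (List Char)) (hdr pref : List Char) :
    (if files.isEmpty then acc else acc ++ [hdr] ++ files.map (fun f => pref ++ f))
    = acc ++ (if files.isEmpty then [] else [hdr] ++ files.map (fun f => pref ++ f)) := by
  split_ifs <;> simp

-- ===== VERDICT (by name: the statement is the Claim_ definition above) =====
theorem parse_file_changes_py_spec : Claim_equal_parse_file_changes_py := by
  intro status _ hpre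
  unfold Spec_parse_file_changes_py
  simp only [parse_file_changes_py, parse_file_changes_py_alt]
  rw [pv_fold_sel _ hpre]
  have hsel : ∀ code, pvSelect ((PySem.Chars.splitOn status.toList "\n".toList).filter pvKeepB) code
      = pvSel code (PySem.Chars.splitOn status.toList "\n".toList) := fun _ => rfl
  simp only [pvSections, List.foldl_cons, List.foldl_nil, hsel, pv_stage, pv_stageB,
    List.nil_append, List.append_assoc]
  split_ifs <;> simp_all [pv_flatten_sing]
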